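-- pv_equiv track=rewrite | github.com/nanaboat/data-structures | Leetcode/invitae.py | filter_solution_1
-- ===== SOURCE A (Python) =====
-- def filter_solution_1(genome_data, filter_definition):
--     # TODO fill this out for task #1
--     results = []
--     for filter in filter_definition:
--         start, end = filter
--         for i in range(start, end):
--             val = _search(genome_data, i)
--             if val:
--                 results.append(val)
--     return results
--
-- def _search(data, item):
--     '''
--     Binary search implementation to find the position in the data
--     Time complexity: O(log(n))
--     '''
--     start = 0
--     stop = len(data) - 1
--
--     while start <= stop:
--       mid = (start + stop) // 2
--       if data[mid][0] == item:
--           return data[mid]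
--       else:
--           if data[mid][0] > item:
--               stop = mid - 1
--           else:
--               start = mid + 1
--     return None
-- ===== SOURCE B (Python) =====
-- def filter_solution_1(genome_data, filter_definition):
--     # genome_data is assumed sorted by key (unique keys); for each filter range,
--     # binary-search the first record with key >= start, then walk forward
--     # collecting records while the key stays inside the range.
--     results = []
--     n = len(genome_data)
--     for start, end in filter_definition:
--         lo, hi = 0, n
--         while lo < hi:
--             mid = (lo + hi) // 2
--             if genome_data[mid][0] < start:
--                 lo = mid + 1
--             else:
--                 hi = mid
--         while lo < n and start <= genome_data[lo][0] < end:
--             results.append(genome_data[lo])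
--             lo += 1
--     return results
-- ===== Notes on version B (the rewrite author's own statement) =====
-- stated objective: alternative
-- what changed: Instead of binary-searching genome_data once per integer of every filter range, B binary-searches each range's start once and walks the sorted data forward while the key stays in the range (asymptotically fewer probes on sorted data, though a timing run's random large inputs lie outside Pre_ so no measured speed is claimed); Pre_ admits strictly key-sorted genome_data (and any input whose filter ranges contain no record key, where both return []), excluding unsorted or duplicate-key data whose ranges do hit keys, since there binary search's hits and misses are an accident of probe order.
-- outside the precondition, e.g. on filter_solution_1([(5, 50), (1, 10)], [(1, 6)]): A returns [(5, 50)], B returns [(5, 50), (1, 10)]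
import Mathlib
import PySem

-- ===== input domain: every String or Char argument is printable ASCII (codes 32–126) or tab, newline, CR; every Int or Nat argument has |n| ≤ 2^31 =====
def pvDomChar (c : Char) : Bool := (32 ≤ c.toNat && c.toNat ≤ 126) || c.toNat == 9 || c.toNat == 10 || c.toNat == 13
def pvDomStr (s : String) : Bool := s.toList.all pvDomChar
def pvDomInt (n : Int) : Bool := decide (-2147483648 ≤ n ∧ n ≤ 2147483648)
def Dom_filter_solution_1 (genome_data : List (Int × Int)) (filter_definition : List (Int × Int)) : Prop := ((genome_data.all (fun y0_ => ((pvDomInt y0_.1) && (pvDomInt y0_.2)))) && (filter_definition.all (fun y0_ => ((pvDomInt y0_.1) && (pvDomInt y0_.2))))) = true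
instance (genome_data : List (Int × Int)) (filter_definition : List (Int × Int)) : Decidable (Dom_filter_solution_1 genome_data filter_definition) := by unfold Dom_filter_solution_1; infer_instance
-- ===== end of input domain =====

-- B binary-searches each range's start once and walks the sorted data forward,
-- instead of binary-searching every integer of every range (fewer probes on
-- sorted data; no measured speed is claimed).

-- ===== PORT A =====
-- the while-loop of _search, on state (start, stop); data[mid] is guarded by
-- pyGet? (the loop keeps mid in range, so the none branch is unreachable)
def searchLoop (data : List (Int × Int)) (item : Int) (start stop : Int) : Option (Int × Int) :=
  if h : start ≤ stop then
    let mid := PySem.Int.floordiv (start + stop) 2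
    match PySem.List.pyGet? data mid with
    | none => none
    | some p =>
      if p.1 = item then some p
      else if p.1 > item then searchLoop data item start (mid - 1)
      else searchLoop data item (mid + 1) stop
  else none
  termination_by (stop - start + 1).toNat
  decreasing_by
  · have := PySem.Int.floordiv_two_mid_bounds h; omega
  · have := PySem.Int.floordiv_two_mid_bounds h; omega

def filter_solution_1 (genome_data : List (Int × Int)) (filter_definition : List (Int × Int)) : List (Int × Int) :=
  filter_definition.foldl (fun results f =>
    (PySem.List.pyRange f.1 f.2 1).foldl (fun results i =>
      match searchLoop genome_data i 0 (genome_data.length - 1) with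
      | some val => results ++ [val]   -- `if val:` — val is a nonempty tuple, always truthy
      | none => results) results) []

-- ===== PORT B =====
-- `while lo < hi: …` — first index with key >= start
def lowerBound (data : List (Int × Int)) (s : Int) (lo hi : Int) : Int :=
  if h : lo < hi then
    let mid := PySem.Int.floordiv (lo + hi) 2
    match PySem.List.pyGet? data mid with
    | none => lo   -- unreachable: 0 ≤ lo ≤ mid < hi ≤ length throughout
    | some p => if p.1 < s then lowerBound data s (mid + 1) hi else lowerBound data s lo mid
  else lo
  termination_by (hi - lo).toNat
  decreasing_by
  · have := PySem.Int.floordiv_two_mid_bounds (le_of_lt h); omega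
  · have h2 : PySem.Int.floordiv (lo + hi) 2 < hi := by
      rw [PySem.Int.floordiv_eq_ediv_of_pos (by omega)]; omega
    have := PySem.Int.floordiv_two_mid_bounds (le_of_lt h); omega

-- `while lo < n and start <= genome_data[lo][0] < end: results.append(…); lo += 1`
def walkLoop (data : List (Int × Int)) (s e : Int) (lo : Int) (acc : List (Int × Int)) : List (Int × Int) :=
  if h : lo < data.length then
    match PySem.List.pyGet? data lo with
    | none => acc   -- unreachable: 0 ≤ lo throughout
    | some p => if s ≤ p.1 ∧ p.1 < e then walkLoop data s e (lo + 1) (acc ++ [p]) else acc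
  else acc
  termination_by ((data.length : Int) - lo).toNat
  decreasing_by omega

def filter_solution_1_alt (genome_data : List (Int × Int)) (filter_definition : List (Int × Int)) : List (Int × Int) :=
  filter_definition.foldl (fun results f =>
    walkLoop genome_data f.1 f.2 (lowerBound genome_data f.1 0 genome_data.length) results) []

-- ===== PRECONDITION & SPEC =====
-- Pre_ admits strictly key-sorted genome_data, and also any input whose filter
-- ranges contain no record key (both programs then return []); it excludes
-- unsorted or duplicate-key data whose ranges do hit keys, since binary search
-- presupposes sorted unique keys and there its hits and misses are an accident
-- of probe order.
def Pre_filter_solution_1 (genome_data : List (Int × Int)) (filter_definition : List (Int × Int)) : Prop :=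
  genome_data.Pairwise (fun p q => p.1 < q.1) ∨
    (∀ f ∈ filter_definition, ∀ p ∈ genome_data, ¬ (f.1 ≤ p.1 ∧ p.1 < f.2))
instance (genome_data : List (Int × Int)) (filter_definition : List (Int × Int)) : Decidable (Pre_filter_solution_1 genome_data filter_definition) := by unfold Pre_filter_solution_1; infer_instance

def pvWitness_filter_solution_1 : (List (Int × Int)) × (List (Int × Int)) :=
  ([(1, 10), (3, 30), (7, 70)], [(2, 8), (0, 2)])

def Spec_filter_solution_1 (genome_data : List (Int × Int)) (filter_definition : List (Int × Int)) (out : List (Int × Int)) : Prop := out = filter_solution_1_alt genome_data filter_definition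
instance (genome_data : List (Int × Int)) (filter_definition : List (Int × Int)) (out : List (Int × Int)) : Decidable (Spec_filter_solution_1 genome_data filter_definition out) := by unfold Spec_filter_solution_1; infer_instance

-- ===== CLAIM (what is proved, stated in full; the proofs are below) =====
def Claim_equal_filter_solution_1 : Prop := ∀ (genome_data : List (Int × Int)) (filter_definition : List (Int × Int)), Dom_filter_solution_1 genome_data filter_definition → Pre_filter_solution_1 genome_data filter_definition → Spec_filter_solution_1 genome_data filter_definition (filter_solution_1 genome_data filter_definition)

-- ===== LEMMAS AND PROOFS =====

-- strict sortedness, index form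
theorem sorted_mono {data : List (Int × Int)} (hs : data.Pairwise (fun p q => p.1 < q.1))
    {j k : Nat} (hjk : j < k) (hk : k < data.length) :
    (data[j]'(by omega)).1 < (data[k]'hk).1 :=
  List.pairwise_iff_getElem.mp hs j k (by omega) hk hjk

-- option-indexed form (avoids getElem proof-term mismatches)
theorem sorted_mono' {data : List (Int × Int)} (hs : data.Pairwise (fun p q => p.1 < q.1))
    {j k : Nat} (hjk : j < k) {x y : Int × Int}
    (hx : data[j]? = some x) (hy : data[k]? = some y) : x.1 < y.1 := by
  have hk : k < data.length := by
    rcases List.getElem?_eq_some_iff.mp hy with ⟨h, _⟩; exact h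
  have hj : j < data.length := by omega
  rw [List.getElem?_eq_getElem hj] at hx
  rw [List.getElem?_eq_getElem hk] at hy
  cases hx; cases hy
  exact sorted_mono hs hjk hk

-- in a strictly sorted list, find? of a present key returns that element
theorem find_of_mem_sorted : ∀ (l : List (Int × Int)), l.Pairwise (fun p q => p.1 < q.1) →
    ∀ (p : Int × Int), p ∈ l → ∀ (i : Int), p.1 = i →
    l.find? (fun q => q.1 == i) = some p := by
  intro l
  induction l with
  | nil => intro _ p hp; simp at hp
  | cons a l' ih =>
    intro hs p hp i hi
    rw [List.pairwise_cons] at hs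
    rcases List.mem_cons.mp hp with h | h
    · subst h
      simp [List.find?_cons, hi]
    · have hne : a.1 ≠ i := by
        have := hs.1 p h; omega
      have : (a.1 == i) = false := by simp [hne]
      simp only [List.find?_cons, this]
      exact ih hs.2 p h i hi

-- binary-search correctness on strictly sorted data
theorem searchCorrect (data : List (Int × Int)) (hs : data.Pairwise (fun p q => p.1 < q.1)) (i : Int) :
    ∀ (n : Nat) (start stop : Int), (stop - start + 1).toNat ≤ n →
    0 ≤ start → stop < (data.length : Int) →
    (∀ j : Nat, (hj : j < data.length) → (data[j]'hj).1 = i → start ≤ (j : Int) ∧ (j : Int) ≤ stop) →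
    searchLoop data i start stop = data.find? (fun p => p.1 == i) := by
  intro n
  induction n with
  | zero =>
    intro start stop hn h0 hlen hinv
    have hss : ¬ start ≤ stop := by omega
    rw [searchLoop, dif_neg hss]
    symm
    rw [List.find?_eq_none]
    intro x hx
    rcases List.mem_iff_getElem.mp hx with ⟨j, hj, hxj⟩
    by_cases hxi : x.1 = i
    · have := hinv j hj (by rw [hxj]; exact hxi); omega
    · simp [hxi]
  | succ m ih =>
    intro start stop hn h0 hlen hinv
    by_cases hss : start ≤ stop
    · rw [searchLoop, dif_pos hss]
      have hmid := PySem.Int.floordiv_two_mid_bounds hss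
      set mid := PySem.Int.floordiv (start + stop) 2 with hmiddef
      have hmid0 : 0 ≤ mid := by omega
      have hmidlt : mid < (data.length : Int) := by omega
      have hget : PySem.List.pyGet? data mid = some (data[mid.toNat]'(by omega)) :=
        PySem.List.pyGet?_eq_some_getElem data hmid0 hmidlt
      simp only [hget]
      set p := data[mid.toNat]'(by omega) with hpdef
      by_cases heq : p.1 = i
      · rw [if_pos heq]
        exact (find_of_mem_sorted data hs p (List.getElem_mem _) i heq).symm
      · rw [if_neg heq]
        by_cases hgt : p.1 > i
        · rw [if_pos hgt]
          apply ih start (mid - 1) (by omega) h0 (by omega)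
          intro j hj hji
          have hold := hinv j hj hji
          have hjm : j < mid.toNat := by
            by_contra hge
            rcases Nat.eq_or_lt_of_le (Nat.le_of_not_lt hge) with heq2 | hlt2
            · apply heq
              rw [hpdef]
              simp only [heq2]
              exact hji
            · have := sorted_mono' hs hlt2
                (x := p) (y := data[j]'hj)
                (by rw [hpdef]; exact List.getElem?_eq_getElem (by omega))
                (List.getElem?_eq_getElem hj)
              rw [hji] at this; omega
          omega
        · rw [if_neg hgt]
          have hlt : p.1 < i := by omega
          apply ih (mid + 1) stop (by omega) (by omega) hlen
          intro j hj hji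
          have hold := hinv j hj hji
          have hjm : mid.toNat < j := by
            by_contra hge
            rcases Nat.eq_or_lt_of_le (Nat.le_of_not_lt hge) with heq2 | hlt2
            · apply heq
              rw [hpdef]
              simp only [← heq2]
              exact hji
            · have := sorted_mono' hs hlt2
                (x := data[j]'hj) (y := p)
                (List.getElem?_eq_getElem hj)
                (by rw [hpdef]; exact List.getElem?_eq_getElem (by omega))
              rw [hji] at this; omega
          omega
    · rw [searchLoop, dif_neg hss]
      symm
      rw [List.find?_eq_none]
      intro x hx
      rcases List.mem_iff_getElem.mp hx with ⟨j, hj, hxj⟩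
      by_cases hxi : x.1 = i
      · have := hinv j hj (by rw [hxj]; exact hxi); omega
      · simp [hxi]

-- enumerating an integer range through the lookup, split off one key
theorem splitRange (g g' : Int → List (Int × Int)) (k : Int) (v : Int × Int)
    (hg : ∀ i, g i = if k = i then [v] else g' i) (hnone : ∀ i, i ≤ k → g' i = []) :
    ∀ (n : Nat) (s e : Int), (e - s).toNat = n →
    (PySem.List.pyRange s e 1).flatMap g
      = (if s ≤ k ∧ k < e then [v] else []) ++ (PySem.List.pyRange s e 1).flatMap g' := by
  intro n
  induction n with
  | zero =>
    intro s e hn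
    rw [PySem.List.pyRange_one_eq_nil (by omega)]
    rw [if_neg (by omega)]
    simp
  | succ m ih =>
    intro s e hn
    by_cases hse : s < e
    · rw [PySem.List.pyRange_one_cons hse]
      simp only [List.flatMap_cons]
      rw [hg s, ih (s + 1) e (by omega)]
      by_cases hks : k = s
      · subst hks
        rw [if_pos rfl, if_neg (by omega), if_pos (by omega), hnone k le_rfl]
        try simp
      · rw [if_neg hks]
        by_cases hsk : s < k
        · rw [hnone s (by omega)]
          by_cases hke : k < e
          · rw [if_pos (by omega), if_pos (by omega)]; try simp
          · rw [if_neg (by omega), if_neg (by omega)]; try simp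
        · rw [if_neg (by omega), if_neg (by omega)]; try simp
    · rw [PySem.List.pyRange_one_eq_nil (by omega), if_neg (by omega)]
      simp

theorem rangeFilter : ∀ (L : List (Int × Int)), L.Pairwise (fun p q => p.1 < q.1) → ∀ (s e : Int),
    (PySem.List.pyRange s e 1).flatMap (fun i => ((L.find? (fun p => p.1 == i)).toList))
      = L.filter (fun p => decide (s ≤ p.1 ∧ p.1 < e)) := by
  intro L
  induction L with
  | nil => intro _ s e; simp
  | cons p L' ih =>
    intro hpw s e
    rw [List.pairwise_cons] at hpw
    have hstep := splitRange (fun i => (((p :: L').find? (fun q => q.1 == i)).toList))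
      (fun i => ((L'.find? (fun q => q.1 == i)).toList)) p.1 p
      (by
        intro i
        simp only [List.find?_cons]
        by_cases h : p.1 = i
        · rw [if_pos h]; simp [h]
        · have : (p.1 == i) = false := by simp [h]
          rw [if_neg h]; simp [this])
      (by
        intro i hik
        have : L'.find? (fun q => q.1 == i) = none := by
          rw [List.find?_eq_none]
          intro q hq
          have := hpw.1 q hq
          simp; omega
        simp [this])
      (e - s).toNat s e rfl
    rw [hstep, ih hpw.2 s e]
    simp only [List.filter_cons]
    by_cases hc : s ≤ p.1 ∧ p.1 < e
    · rw [if_pos hc, if_pos (by simpa using hc)]; simp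
    · rw [if_neg hc, if_neg (by simpa using hc)]; simp

-- A's inner loop, per filter: the range of binary searches collects the in-range records
theorem innerA (gd : List (Int × Int)) (hs : gd.Pairwise (fun p q => p.1 < q.1))
    (f : Int × Int) (res : List (Int × Int)) :
    (PySem.List.pyRange f.1 f.2 1).foldl (fun results i =>
        match searchLoop gd i 0 (gd.length - 1) with
        | some val => results ++ [val]
        | none => results) res
      = res ++ gd.filter (fun p => decide (f.1 ≤ p.1 ∧ p.1 < f.2)) := by
  have h1 : (fun (results : List (Int × Int)) i =>
      match searchLoop gd i 0 (gd.length - 1) with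
      | some val => results ++ [val] | none => results)
      = fun results i => results ++ (searchLoop gd i 0 (gd.length - 1)).toList := by
    funext results i; cases searchLoop gd i 0 (gd.length - 1) <;> simp
  rw [h1, PySem.List.foldl_append_eq_flatMap]
  congr 1
  have h2 : (fun i => (searchLoop gd i 0 (gd.length - 1)).toList)
      = fun i => ((gd.find? (fun p => p.1 == i)).toList) := by
    funext i
    rw [searchCorrect gd hs i (((gd.length : Int) - 1) - 0 + 1).toNat 0 ((gd.length : Int) - 1)
      le_rfl le_rfl (by omega) (by intro j hj _; omega)]
  rw [h2]
  exact rangeFilter gd hs f.1 f.2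

-- takeWhile facts, option-indexed
theorem takeWhile_spec (p : (Int × Int) → Bool) :
    ∀ (l : List (Int × Int)),
      (∀ k : Nat, k < (l.takeWhile p).length → ∀ x, l[k]? = some x → p x = true) ∧
      (∀ x, l[(l.takeWhile p).length]? = some x → p x = false) := by
  intro l
  induction l with
  | nil => constructor <;> simp
  | cons a l' ih =>
    by_cases hpa : p a = true
    · constructor
      · intro k hk x hx
        rw [List.takeWhile_cons, if_pos hpa] at hk
        cases k with
        | zero => simp at hx; rw [← hx]; exact hpa
        | succ k' =>
          simp only [List.getElem?_cons_succ] at hx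
          exact ih.1 k' (by simpa using hk) x hx
      · intro x hx
        rw [List.takeWhile_cons, if_pos hpa] at hx
        simp only [List.length_cons, List.getElem?_cons_succ] at hx
        exact ih.2 x hx
    · constructor
      · intro k hk
        rw [List.takeWhile_cons, if_neg hpa] at hk
        simp at hk
      · intro x hx
        rw [List.takeWhile_cons, if_neg hpa] at hx
        simp only [List.length_nil, List.getElem?_cons_zero] at hx
        cases hx
        simpa using hpa

-- in a strictly sorted list, every element at or after the takeWhile(< s) prefix has key ≥ s
theorem after_prefix_ge (data : List (Int × Int)) (hs : data.Pairwise (fun p q => p.1 < q.1))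
    (s : Int) (k : Nat) (hk : (data.takeWhile (fun p => decide (p.1 < s))).length ≤ k)
    (x : Int × Int) (hx : data[k]? = some x) : ¬ x.1 < s := by
  set t := (data.takeWhile (fun p => decide (p.1 < s))).length with ht
  have hklen : k < data.length := by
    by_contra h
    rw [List.getElem?_eq_none (by omega)] at hx
    cases hx
  have htlen : t < data.length := by omega
  have hxt := (takeWhile_spec (fun p => decide (p.1 < s)) data).2
    (data[t]'htlen) (List.getElem?_eq_getElem htlen)
  have hxt' : ¬ (data[t]'htlen).1 < s := by simpa using hxt
  rcases Nat.eq_or_lt_of_le hk with h | h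
  · have : data[k]? = some (data[t]'htlen) := by
      rw [← h]; exact List.getElem?_eq_getElem htlen
    rw [hx] at this; cases this
    exact hxt'
  · have hmono := sorted_mono hs h hklen
    have : data[k]? = some (data[k]'hklen) := List.getElem?_eq_getElem hklen
    rw [hx] at this; cases this
    omega

-- lowerBound returns the length of the `key < s` prefix
theorem lowerBoundCorrect (data : List (Int × Int)) (hs : data.Pairwise (fun p q => p.1 < q.1))
    (s : Int) :
    ∀ (n : Nat) (lo hi : Int), (hi - lo).toNat ≤ n →
    0 ≤ lo → hi ≤ (data.length : Int) →
    lo ≤ ((data.takeWhile (fun p => decide (p.1 < s))).length : Int) →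
    ((data.takeWhile (fun p => decide (p.1 < s))).length : Int) ≤ hi →
    lowerBound data s lo hi = ((data.takeWhile (fun p => decide (p.1 < s))).length : Int) := by
  set t := (data.takeWhile (fun p => decide (p.1 < s))).length with ht
  intro n
  induction n with
  | zero =>
    intro lo hi hn h0 hlen hlot hthi
    have : ¬ lo < hi := by omega
    rw [lowerBound, dif_neg this]
    omega
  | succ m ih =>
    intro lo hi hn h0 hlen hlot hthi
    by_cases hlh : lo < hi
    · rw [lowerBound, dif_pos hlh]
      have hmid := PySem.Int.floordiv_two_mid_bounds (le_of_lt hlh)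
      have hmidlt : PySem.Int.floordiv (lo + hi) 2 < hi := by
        rw [PySem.Int.floordiv_eq_ediv_of_pos (by omega)]; omega
      set mid := PySem.Int.floordiv (lo + hi) 2 with hmiddef
      have hget : PySem.List.pyGet? data mid = some (data[mid.toNat]'(by omega)) :=
        PySem.List.pyGet?_eq_some_getElem data (by omega) (by omega)
      simp only [hget]
      set p := data[mid.toNat]'(by omega) with hpdef
      by_cases hps : p.1 < s
      · rw [if_pos hps]
        have hmt : mid.toNat < t := by
          by_contra hge
          exact (after_prefix_ge data hs s mid.toNat (by omega) p
            (List.getElem?_eq_getElem (by omega))) hps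
        exact ih (mid + 1) hi (by omega) (by omega) hlen (by omega) hthi
      · rw [if_neg hps]
        have htm : t ≤ mid.toNat := by
          by_contra hlt
          have := (takeWhile_spec (fun p => decide (p.1 < s)) data).1 mid.toNat (by omega) p
            (List.getElem?_eq_getElem (by omega))
          simp at this
          exact hps this
        exact ih lo mid (by omega) h0 (by omega) hlot (by omega)
    · rw [lowerBound, dif_neg hlh]
      omega

-- the walk collects the takeWhile(in range) of the remaining suffix
theorem walkCorrect (data : List (Int × Int)) (s e : Int) :
    ∀ (n : Nat) (lo : Int) (acc : List (Int × Int)), ((data.length : Int) - lo).toNat ≤ n → 0 ≤ lo →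
    walkLoop data s e lo acc = acc ++ (data.drop lo.toNat).takeWhile (fun p => decide (s ≤ p.1 ∧ p.1 < e)) := by
  intro n
  induction n with
  | zero =>
    intro lo acc hn h0
    have hge : ¬ lo < (data.length : Int) := by omega
    rw [walkLoop, dif_neg hge]
    rw [List.drop_eq_nil_of_le (by omega)]
    simp
  | succ m ih =>
    intro lo acc hn h0
    by_cases hlt : lo < (data.length : Int)
    · rw [walkLoop, dif_pos hlt]
      have hget : PySem.List.pyGet? data lo = some (data[lo.toNat]'(by omega)) :=
        PySem.List.pyGet?_eq_some_getElem data h0 hlt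
      simp only [hget]
      set p := data[lo.toNat]'(by omega) with hpdef
      have hdrop : data.drop lo.toNat = p :: data.drop (lo.toNat + 1) :=
        List.drop_eq_getElem_cons (by omega)
      rw [hdrop, List.takeWhile_cons]
      by_cases hpe : s ≤ p.1 ∧ p.1 < e
      · rw [if_pos hpe, if_pos (by simpa using hpe)]
        rw [ih (lo + 1) (acc ++ [p]) (by omega) (by omega)]
        have : (lo + 1).toNat = lo.toNat + 1 := by omega
        rw [this, List.append_assoc]
        simp
      · rw [if_neg hpe, if_neg (by simpa using hpe)]
        simp
    · rw [walkLoop, dif_neg hlt]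
      rw [List.drop_eq_nil_of_le (by omega)]
      simp

-- on a strictly sorted list, filter by an upper bound = takeWhile
theorem filter_eq_takeWhile_lt (e : Int) :
    ∀ (l : List (Int × Int)), l.Pairwise (fun p q => p.1 < q.1) →
    l.filter (fun p => decide (p.1 < e)) = l.takeWhile (fun p => decide (p.1 < e)) := by
  intro l
  induction l with
  | nil => simp
  | cons a l' ih =>
    intro hs
    rw [List.pairwise_cons] at hs
    rw [List.filter_cons, List.takeWhile_cons]
    by_cases hae : a.1 < e
    · rw [if_pos (by simpa using hae), if_pos (by simpa using hae)]
      rw [ih hs.2]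
    · rw [if_neg (by simpa using hae), if_neg (by simpa using hae)]
      rw [List.filter_eq_nil_iff]
      intro x hx
      have := hs.1 x hx
      simp; omega

-- takeWhile only inspects members, so member-wise equal predicates agree
theorem takeWhile_congr_mem (p q : (Int × Int) → Bool) :
    ∀ (l : List (Int × Int)), (∀ x ∈ l, p x = q x) → l.takeWhile p = l.takeWhile q := by
  intro l
  induction l with
  | nil => intro _; rfl
  | cons a l' ih =>
    intro h
    rw [List.takeWhile_cons, List.takeWhile_cons, h a List.mem_cons_self]
    by_cases hq : q a = true
    · rw [if_pos hq, if_pos hq, ih (fun x hx => h x (List.mem_cons_of_mem a hx))]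
    · rw [if_neg hq, if_neg hq]

-- the suffix after the `key < s` prefix, takeWhile'd by the range test, is the range filter
theorem suffix_takeWhile_eq_filter (data : List (Int × Int))
    (hs : data.Pairwise (fun p q => p.1 < q.1)) (s e : Int) :
    (data.drop (data.takeWhile (fun p => decide (p.1 < s))).length).takeWhile (fun p => decide (s ≤ p.1 ∧ p.1 < e))
      = data.filter (fun p => decide (s ≤ p.1 ∧ p.1 < e)) := by
  set t := (data.takeWhile (fun p => decide (p.1 < s))).length with ht
  have hsplit : data = data.take t ++ data.drop t := (List.take_append_drop t data).symm
  have htake : data.take t = data.takeWhile (fun p => decide (p.1 < s)) := by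
    obtain ⟨u, hu⟩ := List.takeWhile_prefix (l := data) (fun p => decide (p.1 < s))
    have h := List.take_left (l₁ := data.takeWhile (fun p => decide (p.1 < s))) (l₂ := u)
    rw [hu] at h
    rw [ht]; exact h
  have hdropSorted : (data.drop t).Pairwise (fun p q => p.1 < q.1) :=
    hs.sublist (List.drop_sublist t data)
  have hpre : ∀ x ∈ data.take t, (x.1 < s) := by
    intro x hx
    rw [htake] at hx
    have := List.mem_takeWhile_imp hx
    simpa using this
  have hsuf : ∀ x ∈ data.drop t, s ≤ x.1 := by
    intro x hx
    rcases List.mem_iff_getElem.mp hx with ⟨j, hj, hxj⟩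
    rw [List.getElem_drop] at hxj
    have hlen : t + j < data.length := by
      have := List.length_drop (l := data) (i := t); omega
    have := after_prefix_ge data hs s (t + j) (by omega) x
      (by rw [← hxj]; exact List.getElem?_eq_getElem hlen)
    omega
  conv_rhs => rw [hsplit]
  rw [List.filter_append]
  have h1 : (data.take t).filter (fun p => decide (s ≤ p.1 ∧ p.1 < e)) = [] := by
    rw [List.filter_eq_nil_iff]
    intro x hx
    have := hpre x hx
    simp; omega
  have h2 : (data.drop t).filter (fun p => decide (s ≤ p.1 ∧ p.1 < e))
      = (data.drop t).filter (fun p => decide (p.1 < e)) := by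
    apply List.filter_congr
    intro x hx
    have := hsuf x hx
    simp; omega
  rw [h1, h2, List.nil_append]
  rw [takeWhile_congr_mem _ _ (data.drop t)
    (by intro x hx
        have h := hsuf x hx
        show decide (s ≤ x.1 ∧ x.1 < e) = decide (x.1 < e)
        simp only [decide_eq_decide]
        exact ⟨fun hh => hh.2, fun hh => ⟨h, hh⟩⟩)]
  exact (filter_eq_takeWhile_lt e (data.drop t) hdropSorted).symm

-- B's inner step, per filter
theorem innerB (gd : List (Int × Int)) (hs : gd.Pairwise (fun p q => p.1 < q.1))
    (f : Int × Int) (res : List (Int × Int)) :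
    walkLoop gd f.1 f.2 (lowerBound gd f.1 0 gd.length) res
      = res ++ gd.filter (fun p => decide (f.1 ≤ p.1 ∧ p.1 < f.2)) := by
  set t := (gd.takeWhile (fun p => decide (p.1 < f.1))).length with ht
  have hlb : lowerBound gd f.1 0 gd.length = (t : Int) := by
    apply lowerBoundCorrect gd hs f.1 gd.length 0 gd.length
    · omega
    · omega
    · omega
    · have := List.Sublist.length_le (List.takeWhile_sublist (l := gd) (fun p => decide (p.1 < f.1))); omega
    · have := List.Sublist.length_le (List.takeWhile_sublist (l := gd) (fun p => decide (p.1 < f.1))); omega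
  rw [hlb, walkCorrect gd f.1 f.2 ((gd.length : Int) - (t : Int)).toNat (t : Int) res le_rfl (by omega)]
  rw [Int.toNat_natCast]
  rw [suffix_takeWhile_eq_filter gd hs f.1 f.2]

-- a successful binary search returns a member with the searched key
theorem searchLoop_someAux (data : List (Int × Int)) (item : Int) :
    ∀ (n : Nat) (start stop : Int) (p : Int × Int), (stop - start + 1).toNat ≤ n →
    searchLoop data item start stop = some p → p ∈ data ∧ p.1 = item := by
  intro n
  induction n with
  | zero =>
    intro start stop p hn hp
    rw [searchLoop, dif_neg (by omega)] at hp
    cases hp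
  | succ m ih =>
    intro start stop p hn hp
    by_cases hss : start ≤ stop
    · rw [searchLoop, dif_pos hss] at hp
      have hmid := PySem.Int.floordiv_two_mid_bounds hss
      set mid := PySem.Int.floordiv (start + stop) 2 with hmd
      cases hget : PySem.List.pyGet? data mid with
      | none => simp only [hget] at hp; cases hp
      | some q =>
        simp only [hget] at hp
        by_cases heq : q.1 = item
        · rw [if_pos heq] at hp
          cases hp
          exact ⟨PySem.List.mem_of_pyGet?_eq_some data hget, heq⟩
        · rw [if_neg heq] at hp
          by_cases hgt : q.1 > item
          · rw [if_pos hgt] at hp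
            exact ih start (mid - 1) p (by omega) hp
          · rw [if_neg hgt] at hp
            exact ih (mid + 1) stop p (by omega) hp
    · rw [searchLoop, dif_neg hss] at hp
      cases hp

theorem searchLoop_some (data : List (Int × Int)) (item : Int)
    (start stop : Int) (p : Int × Int) (hp : searchLoop data item start stop = some p) :
    p ∈ data ∧ p.1 = item :=
  searchLoop_someAux data item (stop - start + 1).toNat start stop p le_rfl hp

-- a fold whose step never changes the accumulator
theorem foldl_fix {α β : Type} (l : List β) (f : α → β → α)
    (h : ∀ (a : α) (x : β), x ∈ l → f a x = a) : ∀ a, l.foldl f a = a := by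
  induction l with
  | nil => intro a; rfl
  | cons b l' ih =>
    intro a
    rw [List.foldl_cons, h a b List.mem_cons_self]
    exact ih (fun a x hx => h a x (List.mem_cons_of_mem b hx)) a

-- when no record key lies in any filter range, A returns []
theorem a_nil (gd fd : List (Int × Int))
    (hnh : ∀ f ∈ fd, ∀ p ∈ gd, ¬ (f.1 ≤ p.1 ∧ p.1 < f.2)) :
    filter_solution_1 gd fd = [] := by
  unfold filter_solution_1
  apply foldl_fix
  intro acc f hf
  apply foldl_fix
  intro acc2 i hi
  have hi' := PySem.List.mem_pyRange_one.mp hi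
  cases hsl : searchLoop gd i 0 ((gd.length : Int) - 1) with
  | none => rfl
  | some p =>
    exact absurd ⟨by have := (searchLoop_some gd i 0 ((gd.length : Int) - 1) p hsl).2; omega,
        by have := (searchLoop_some gd i 0 ((gd.length : Int) - 1) p hsl).2; omega⟩
      (hnh f hf p (searchLoop_some gd i 0 ((gd.length : Int) - 1) p hsl).1)

-- when no record key lies in any filter range, B returns []
theorem b_nil (gd fd : List (Int × Int))
    (hnh : ∀ f ∈ fd, ∀ p ∈ gd, ¬ (f.1 ≤ p.1 ∧ p.1 < f.2)) :
    filter_solution_1_alt gd fd = [] := by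
  unfold filter_solution_1_alt
  apply foldl_fix
  intro acc f hf
  by_cases hlt : lowerBound gd f.1 0 gd.length < (gd.length : Int)
  · rw [walkLoop, dif_pos hlt]
    cases hget : PySem.List.pyGet? gd (lowerBound gd f.1 0 (gd.length : Int)) with
    | none => simp only [hget]
    | some p =>
      simp only [hget]
      rw [if_neg (hnh f hf p (PySem.List.mem_of_pyGet?_eq_some gd hget))]
  · rw [walkLoop, dif_neg hlt]

-- ===== VERDICT (by name: the statement is the Claim_ definition above) =====
theorem filter_solution_1_spec : Claim_equal_filter_solution_1 := by
  intro gd fd _ hpre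
  unfold Spec_filter_solution_1
  rcases hpre with hs | hnh
  · unfold filter_solution_1 filter_solution_1_alt
    apply PySem.List.foldl_congr_mem
    intro acc x _
    rw [innerA gd hs x acc, innerB gd hs x acc]
  · rw [a_nil gd fd hnh, b_nil gd fd hnh]
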